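-- pv_equiv track=rewrite | github.com/clovell/latin-reader | test_formatter.py | reconstruct_entry
-- ===== SOURCE A (Python) =====
-- def reconstruct_entry(stems, pos, morph):
--     stems = [s for s in stems if s and s != 'zzz' and s != 'empty']
--     if not stems: return ""
--
--     parts = morph.split()
--     decl_conj = parts[0] if len(parts) > 0 else '0'
--     var = parts[1] if len(parts) > 1 else '0'
--
--     res = []
--
--     if pos == 'N':
--         gender = parts[2] if len(parts) > 2 else ''
--         gen_str = f", {gender.lower()}." if gender and gender != 'X' else ""
--         if decl_conj == '1':
--             res.append(stems[0] + "a")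
--             if len(stems) > 1: res.append(stems[1] + "ae" + gen_str)
--         elif decl_conj == '2':
--             if var == '1': res.append(stems[0] + "us")
--             elif var == '2': res.append(stems[0] + "um")
--             elif var == '3': res.append(stems[0]) # puer
--             else: res.append(stems[0] + "us")
--             if len(stems) > 1: res.append(stems[1] + "i" + gen_str)
--         elif decl_conj == '3':
--             res.append(stems[0])
--             if len(stems) > 1: res.append(stems[1] + "is" + gen_str)
--         elif decl_conj == '4':
--             if var == '2': res.append(stems[0] + "u")
--             else: res.append(stems[0] + "us")
--             if len(stems) > 1: res.append(stems[1] + "us" + gen_str)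
--         elif decl_conj == '5':
--             res.append(stems[0] + "es")
--             if len(stems) > 1: res.append(stems[1] + "ei" + gen_str)
--         else:
--             res.append(stems[0])
--
--     elif pos == 'V':
--         if decl_conj == '1':
--             res.append(stems[0] + "o")
--             if len(stems) > 1: res.append(stems[1] + "are")
--             if len(stems) > 2: res.append(stems[2] + "i")
--             if len(stems) > 3: res.append(stems[3] + "us")
--         elif decl_conj == '2':
--             res.append(stems[0] + "eo")
--             if len(stems) > 1: res.append(stems[1] + "ere")
--             if len(stems) > 2: res.append(stems[2] + "i")
--             if len(stems) > 3: res.append(stems[3] + "us")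
--         elif decl_conj == '3':
--             # io verbs var? Whitaker uses 3 1 for rego, 3 4 or something for capio? Let's check DB.
--             res.append(stems[0] + "o") # approximation
--             if len(stems) > 1: res.append(stems[1] + "ere")
--             if len(stems) > 2: res.append(stems[2] + "i")
--             if len(stems) > 3: res.append(stems[3] + "us")
--         elif decl_conj == '4':
--             res.append(stems[0] + "io")
--             if len(stems) > 1: res.append(stems[1] + "ire")
--             if len(stems) > 2: res.append(stems[2] + "i")
--             if len(stems) > 3: res.append(stems[3] + "us")
--         elif decl_conj == '8': # irregular
--             res = stems
--         else:
--             res = stems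
--     elif pos == 'ADJ':
--         if decl_conj == '1':
--             res.append(stems[0] + "us")
--             if len(stems) > 1: res.append(stems[1] + "a")
--             if len(stems) > 2: res.append(stems[2] + "um")
--         elif decl_conj == '3':
--             res.append(stems[0] + "is")
--             if len(stems) > 1: res.append(stems[1] + "e")
--         else:
--             res = stems
--     else:
--         res = stems
--
--     return ", ".join(res) if res else stems[0]
-- ===== SOURCE B (Python) =====
-- NOUN_ENDINGS = {
--     '1': ['a', 'ae'],
--     '3': ['', 'is'],
--     '5': ['es', 'ei'],
-- }
-- VERB_ENDINGS = {
--     '1': ['o', 'are', 'i', 'us'],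
--     '2': ['eo', 'ere', 'i', 'us'],
--     '3': ['o', 'ere', 'i', 'us'],
--     '4': ['io', 'ire', 'i', 'us'],
-- }
-- ADJ_ENDINGS = {
--     '1': ['us', 'a', 'um'],
--     '3': ['is', 'e'],
-- }
--
-- def reconstruct_entry(stems, pos, morph):
--     stems = [s for s in stems if s and s != 'zzz' and s != 'empty']
--     if not stems:
--         return ""
--
--     parts = morph.split()
--     decl_conj = parts[0] if len(parts) > 0 else '0'
--     var = parts[1] if len(parts) > 1 else '0'
--
--     if pos == 'N':
--         if decl_conj == '2':
--             endings = [{'1': 'us', '2': 'um', '3': ''}.get(var, 'us'), 'i']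
--         elif decl_conj == '4':
--             endings = [('u' if var == '2' else 'us'), 'us']
--         else:
--             endings = NOUN_ENDINGS.get(decl_conj)
--         if endings is None:
--             return stems[0]
--         gender = parts[2] if len(parts) > 2 else ''
--         gen_str = f", {gender.lower()}." if gender and gender != 'X' else ""
--         res = [stem + end + (gen_str if i == 1 else '')
--                for i, (stem, end) in enumerate(zip(stems, endings))]
--     elif pos == 'V':
--         endings = VERB_ENDINGS.get(decl_conj)
--         res = stems if endings is None else [s + e for s, e in zip(stems, endings)]
--     elif pos == 'ADJ':
--         endings = ADJ_ENDINGS.get(decl_conj)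
--         res = stems if endings is None else [s + e for s, e in zip(stems, endings)]
--     else:
--         res = stems
--
--     return ", ".join(res)
-- ===== Notes on version B (the rewrite author's own statement) =====
-- stated objective: simpler
-- what changed: Replaced A's per-branch append sequences (each declension branch hand-appending stem+ending with its own len(stems) guards) by lookup tables mapping declension to an ending list, zipped against the stems in one generic comprehension, with the variant-sensitive noun cases as keyed overrides.
import Mathlib
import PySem

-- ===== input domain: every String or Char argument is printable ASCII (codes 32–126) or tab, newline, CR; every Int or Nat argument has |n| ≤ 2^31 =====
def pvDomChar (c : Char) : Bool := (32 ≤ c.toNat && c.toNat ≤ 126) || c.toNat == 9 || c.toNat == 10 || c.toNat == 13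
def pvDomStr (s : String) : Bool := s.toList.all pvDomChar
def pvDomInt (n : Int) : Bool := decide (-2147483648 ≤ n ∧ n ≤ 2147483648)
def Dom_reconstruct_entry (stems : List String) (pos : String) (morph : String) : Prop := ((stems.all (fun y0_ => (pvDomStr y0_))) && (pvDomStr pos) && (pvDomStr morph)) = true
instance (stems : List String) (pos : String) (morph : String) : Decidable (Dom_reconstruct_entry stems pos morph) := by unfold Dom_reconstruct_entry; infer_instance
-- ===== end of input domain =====

-- B replaces A's per-branch append sequences by lookup tables (pos, decl_conj) → ending list
-- zipped against the stems in one generic pass; same return value, simpler structure (objective: simpler).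


-- ===== PORT A =====
def reconstruct_entry (stems : List String) (pos : String) (morph : String) : String :=
  let stems := stems.filter (fun s => (s != "") && (s != "zzz") && (s != "empty"))
  match stems with
  | [] => ""
  | s0 :: rest =>
    let parts := PySem.Str.split₀ morph
    let decl_conj := if parts.length > 0 then PySem.List.pyGetD parts 0 "0" else "0"
    let var := if parts.length > 1 then PySem.List.pyGetD parts 1 "0" else "0"
    let res : List String :=
      if pos = "N" then
        let gender := if parts.length > 2 then PySem.List.pyGetD parts 2 "" else ""
        let gen_str := if gender != "" && gender != "X" then ", " ++ PySem.Str.lower gender ++ "." else ""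
        if decl_conj = "1" then
          (s0 ++ "a") :: (match rest with | [] => [] | s1 :: _ => [s1 ++ "ae" ++ gen_str])
        else if decl_conj = "2" then
          (if var = "1" then s0 ++ "us"
           else if var = "2" then s0 ++ "um"
           else if var = "3" then s0
           else s0 ++ "us")
            :: (match rest with | [] => [] | s1 :: _ => [s1 ++ "i" ++ gen_str])
        else if decl_conj = "3" then
          s0 :: (match rest with | [] => [] | s1 :: _ => [s1 ++ "is" ++ gen_str])
        else if decl_conj = "4" then
          (if var = "2" then s0 ++ "u" else s0 ++ "us")
            :: (match rest with | [] => [] | s1 :: _ => [s1 ++ "us" ++ gen_str])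
        else if decl_conj = "5" then
          (s0 ++ "es") :: (match rest with | [] => [] | s1 :: _ => [s1 ++ "ei" ++ gen_str])
        else [s0]
      else if pos = "V" then
        if decl_conj = "1" then
          (s0 ++ "o") :: (match rest with
            | [] => []
            | s1 :: rest2 => (s1 ++ "are") :: (match rest2 with
              | [] => []
              | s2 :: rest3 => (s2 ++ "i") :: (match rest3 with
                | [] => [] | s3 :: _ => [s3 ++ "us"])))
        else if decl_conj = "2" then
          (s0 ++ "eo") :: (match rest with
            | [] => []
            | s1 :: rest2 => (s1 ++ "ere") :: (match rest2 with
              | [] => []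
              | s2 :: rest3 => (s2 ++ "i") :: (match rest3 with
                | [] => [] | s3 :: _ => [s3 ++ "us"])))
        else if decl_conj = "3" then
          (s0 ++ "o") :: (match rest with
            | [] => []
            | s1 :: rest2 => (s1 ++ "ere") :: (match rest2 with
              | [] => []
              | s2 :: rest3 => (s2 ++ "i") :: (match rest3 with
                | [] => [] | s3 :: _ => [s3 ++ "us"])))
        else if decl_conj = "4" then
          (s0 ++ "io") :: (match rest with
            | [] => []
            | s1 :: rest2 => (s1 ++ "ire") :: (match rest2 with
              | [] => []
              | s2 :: rest3 => (s2 ++ "i") :: (match rest3 with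
                | [] => [] | s3 :: _ => [s3 ++ "us"])))
        else if decl_conj = "8" then s0 :: rest
        else s0 :: rest
      else if pos = "ADJ" then
        if decl_conj = "1" then
          (s0 ++ "us") :: (match rest with
            | [] => []
            | s1 :: rest2 => (s1 ++ "a") :: (match rest2 with
              | [] => [] | s2 :: _ => [s2 ++ "um"]))
        else if decl_conj = "3" then
          (s0 ++ "is") :: (match rest with | [] => [] | s1 :: _ => [s1 ++ "e"])
        else s0 :: rest
      else s0 :: rest
    if res != [] then PySem.Str.join ", " res else s0

-- ===== PORT B =====
def pvNounEndings : PySem.Dict String (List String) :=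
  PySem.Dict.mk [("1", ["a", "ae"]), ("3", ["", "is"]), ("5", ["es", "ei"])]
def pvVerbEndings : PySem.Dict String (List String) :=
  PySem.Dict.mk [("1", ["o", "are", "i", "us"]), ("2", ["eo", "ere", "i", "us"]),
                     ("3", ["o", "ere", "i", "us"]), ("4", ["io", "ire", "i", "us"])]
def pvAdjEndings : PySem.Dict String (List String) :=
  PySem.Dict.mk [("1", ["us", "a", "um"]), ("3", ["is", "e"])]

def reconstruct_entry_alt (stems : List String) (pos : String) (morph : String) : String :=
  let stems := stems.filter (fun s => (s != "") && (s != "zzz") && (s != "empty"))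
  if stems.isEmpty then ""
  else
    let parts := PySem.Str.split₀ morph
    let decl_conj := parts.getD 0 "0"   -- parts[0] if len(parts) > 0 else '0'
    let var := parts.getD 1 "0"         -- parts[1] if len(parts) > 1 else '0'
    if pos = "N" then
      let endings? : Option (List String) :=
        if decl_conj = "2" then
          some [(PySem.Dict.mk [("1", "us"), ("2", "um"), ("3", "")]).getD var "us", "i"]
        else if decl_conj = "4" then
          some [(if var = "2" then "u" else "us"), "us"]
        else pvNounEndings.get? decl_conj
      match endings? with
      | none => stems.headI
      | some endings =>
        let gender := parts.getD 2 ""   -- parts[2] if len(parts) > 2 else ''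
        let gen_str := if gender != "" && gender != "X" then ", " ++ PySem.Str.lower gender ++ "." else ""
        let res := (PySem.List.enumerate (stems.zip endings)).map
          (fun p => p.2.1 ++ p.2.2 ++ (if p.1 = 1 then gen_str else ""))
        PySem.Str.join ", " res
    else if pos = "V" then
      let res := match pvVerbEndings.get? decl_conj with
        | none => stems
        | some endings => (stems.zip endings).map (fun p => p.1 ++ p.2)
      PySem.Str.join ", " res
    else if pos = "ADJ" then
      let res := match pvAdjEndings.get? decl_conj with
        | none => stems
        | some endings => (stems.zip endings).map (fun p => p.1 ++ p.2)
      PySem.Str.join ", " res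
    else
      PySem.Str.join ", " stems

-- ===== PRECONDITION & SPEC =====
def Spec_reconstruct_entry (stems : List String) (pos : String) (morph : String) (out : String) : Prop := out = reconstruct_entry_alt stems pos morph
instance (stems : List String) (pos : String) (morph : String) (out : String) : Decidable (Spec_reconstruct_entry stems pos morph out) := by unfold Spec_reconstruct_entry; infer_instance

-- ===== CLAIM (what is proved, stated in full; the proofs are below) =====
def Claim_equal_reconstruct_entry : Prop := ∀ (stems : List String) (pos : String) (morph : String), Dom_reconstruct_entry stems pos morph → Spec_reconstruct_entry stems pos morph (reconstruct_entry stems pos morph)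

-- ===== LEMMAS AND PROOFS =====

theorem pvAcc0 (l : List String) :
    (if l.length > 0 then PySem.List.pyGetD l 0 "0" else "0") = l.getD 0 "0" := by
  rcases l with _ | ⟨a, t⟩ <;> simp [PySem.List.pyGetD, PySem.List.pyGet?, PySem.List.pyIdx?]

theorem pvAcc1 (l : List String) :
    (if l.length > 1 then PySem.List.pyGetD l 1 "0" else "0") = l.getD 1 "0" := by
  rcases l with _ | ⟨a, _ | ⟨b, t⟩⟩ <;> simp [PySem.List.pyGetD, PySem.List.pyGet?, PySem.List.pyIdx?]

theorem pvAcc2 (l : List String) :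
    (if l.length > 2 then PySem.List.pyGetD l 2 "" else "") = l.getD 2 "" := by
  rcases l with _ | ⟨a, _ | ⟨b, _ | ⟨c, t⟩⟩⟩ <;>
    simp [PySem.List.pyGetD, PySem.List.pyGet?, PySem.List.pyIdx?]
  rw [if_pos (by omega)]
  simp

theorem reconstruct_entry_eq (stems : List String) (pos : String) (morph : String) :
    reconstruct_entry stems pos morph = reconstruct_entry_alt stems pos morph := by
  unfold reconstruct_entry reconstruct_entry_alt
  cases hf : stems.filter (fun s => (s != "") && (s != "zzz") && (s != "empty")) with
  | nil => rfl
  | cons s0 rest =>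
    simp only [List.isEmpty_cons, Bool.false_eq_true, if_false, List.headI]
    set parts := PySem.Str.split₀ morph with hp
    rw [pvAcc0 parts, pvAcc1 parts, pvAcc2 parts]
    set dc := parts.getD 0 "0" with hdc
    set var := parts.getD 1 "0" with hvar
    by_cases hN : pos = "N"
    · -- pos = N
      simp only [hN]
      by_cases h1 : dc = "1"
      · rcases rest with _ | ⟨s1, rest2⟩ <;>
          simp [h1, pvNounEndings, PySem.Dict.get?, PySem.List.enumerate]
      · by_cases h2 : dc = "2"
        · by_cases v1 : var = "1"
          · rcases rest with _ | ⟨s1, rest2⟩ <;>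
              simp [h2, v1, PySem.Dict.get?, PySem.Dict.getD, PySem.List.enumerate]
          · by_cases v2 : var = "2"
            · rcases rest with _ | ⟨s1, rest2⟩ <;>
                simp [h2, v2, PySem.Dict.get?, PySem.Dict.getD, PySem.List.enumerate]
            · by_cases v3 : var = "3"
              · rcases rest with _ | ⟨s1, rest2⟩ <;>
                  simp [h2, v3, PySem.Dict.get?, PySem.Dict.getD, PySem.List.enumerate]
              · rcases rest with _ | ⟨s1, rest2⟩ <;>
                  simp [h2, v1, v2, v3, PySem.Dict.get?, PySem.Dict.getD, PySem.List.enumerate, Ne.symm v1, Ne.symm v2, Ne.symm v3]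
        · by_cases h3 : dc = "3"
          · rcases rest with _ | ⟨s1, rest2⟩ <;>
              simp [h3, pvNounEndings, PySem.Dict.get?, PySem.List.enumerate]
          · by_cases h4 : dc = "4"
            · by_cases v2 : var = "2"
              · rcases rest with _ | ⟨s1, rest2⟩ <;>
                  simp [h4, v2, PySem.List.enumerate]
              · rcases rest with _ | ⟨s1, rest2⟩ <;>
                  simp [h4, v2, PySem.List.enumerate]
            · by_cases h5 : dc = "5"
              · rcases rest with _ | ⟨s1, rest2⟩ <;>
                  simp [h5, pvNounEndings, PySem.Dict.get?, PySem.List.enumerate]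
              · simp [h1, h2, h3, h4, h5, pvNounEndings, PySem.Dict.get?, Ne.symm h1, Ne.symm h3, Ne.symm h5, PySem.Str.join]
    · by_cases hV : pos = "V"
      · -- pos = V
        simp only [hV]
        by_cases h1 : dc = "1"
        · rcases rest with _ | ⟨s1, _ | ⟨s2, _ | ⟨s3, rest4⟩⟩⟩ <;>
            simp [h1, pvVerbEndings, PySem.Dict.get?]
        · by_cases h2 : dc = "2"
          · rcases rest with _ | ⟨s1, _ | ⟨s2, _ | ⟨s3, rest4⟩⟩⟩ <;>
              simp [h2, pvVerbEndings, PySem.Dict.get?]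
          · by_cases h3 : dc = "3"
            · rcases rest with _ | ⟨s1, _ | ⟨s2, _ | ⟨s3, rest4⟩⟩⟩ <;>
                simp [h3, pvVerbEndings, PySem.Dict.get?]
            · by_cases h4 : dc = "4"
              · rcases rest with _ | ⟨s1, _ | ⟨s2, _ | ⟨s3, rest4⟩⟩⟩ <;>
                  simp [h4, pvVerbEndings, PySem.Dict.get?]
              · by_cases h8 : dc = "8" <;>
                  simp [h1, h2, h3, h4, h8, pvVerbEndings, PySem.Dict.get?, Ne.symm h1, Ne.symm h2, Ne.symm h3, Ne.symm h4]
      · by_cases hA : pos = "ADJ"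
        · -- pos = ADJ
          simp only [hA]
          by_cases h1 : dc = "1"
          · rcases rest with _ | ⟨s1, _ | ⟨s2, rest3⟩⟩ <;>
              simp [h1, pvAdjEndings, PySem.Dict.get?]
          · by_cases h3 : dc = "3"
            · rcases rest with _ | ⟨s1, rest2⟩ <;>
                simp [h3, pvAdjEndings, PySem.Dict.get?]
            · simp [h1, h3, pvAdjEndings, PySem.Dict.get?, Ne.symm h1, Ne.symm h3]
        · simp [if_neg hN, if_neg hV, if_neg hA]

-- ===== VERDICT (by name: the statement is the Claim_ definition above) =====
theorem reconstruct_entry_spec : Claim_equal_reconstruct_entry := by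
  intro stems pos morph _
  exact reconstruct_entry_eq stems pos morph
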